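-- pv_equiv track=rewrite | github.com/really-no-name/PersonalLeetCode | PersonalInterview/zxsk/train/0202.py | min_key_presses
-- ===== SOURCE A (Python) =====
-- def min_key_presses(s):
--     uppercase_mode = False
--     key_presses = 0
--     for char in s:
--         if char.isupper() != uppercase_mode:
--             key_presses += 1
--             uppercase_mode = not uppercase_mode
--         key_presses += 1
--     return key_presses
-- ===== SOURCE B (Python) =====
-- def min_key_presses(s):
--     # Split s into maximal runs of same letter-case; each run boundary costs one
--     # caps toggle, plus one extra toggle if the first run is uppercase.
--     if not s:
--         return 0
--     runs = []
--     i = 0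
--     n = len(s)
--     while i < n:
--         up = s[i].isupper()
--         j = i
--         while j < n and s[j].isupper() == up:
--             j += 1
--         runs.append(up)
--         i = j
--     return n + len(runs) - 1 + (1 if runs[0] else 0)
-- ===== Notes on version B (the rewrite author's own statement) =====
-- stated objective: alternative
-- what changed: Instead of A's fused single loop carrying a running caps-mode flag, B segments the string into maximal runs of equal letter-case with a two-pointer scan and computes the answer in closed form from the run list: len(s) + (#runs - 1) + 1 if the first run is uppercase.
import Mathlib
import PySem

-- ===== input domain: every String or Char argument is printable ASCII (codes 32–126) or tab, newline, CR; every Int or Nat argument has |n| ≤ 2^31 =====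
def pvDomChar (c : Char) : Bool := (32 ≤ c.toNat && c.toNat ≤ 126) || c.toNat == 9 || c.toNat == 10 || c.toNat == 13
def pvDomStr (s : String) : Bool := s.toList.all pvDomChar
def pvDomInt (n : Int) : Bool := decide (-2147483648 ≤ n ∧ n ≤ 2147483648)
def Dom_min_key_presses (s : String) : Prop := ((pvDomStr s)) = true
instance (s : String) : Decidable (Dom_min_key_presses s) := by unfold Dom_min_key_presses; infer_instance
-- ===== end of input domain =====

-- B segments the string into maximal runs of equal letter-case and computes the answer in
-- closed form from the run list, instead of A's fused running-mode loop; alternative decomposition, same cost.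

-- ===== PORT A =====
def min_key_presses (s : String) : Int :=
  (s.toList.foldl
    (fun (st : Bool × Int) (c : Char) =>
      let st := if PySem.Chars.isupper c != st.1 then (!st.1, st.2 + 1) else st
      (st.1, st.2 + 1))
    (false, 0)).2

-- ===== PORT B =====
-- two-pointer run scan of Source B: each step consumes one maximal run of equal case
def pvRuns : List Char → List Bool
  | [] => []
  | c :: cs =>
      PySem.Chars.isupper c ::
        pvRuns (cs.dropWhile (fun d => PySem.Chars.isupper d == PySem.Chars.isupper c))
termination_by l => l.length
decreasing_by
  exact Nat.lt_succ_of_le (List.length_dropWhile_le _ _)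

def min_key_presses_alt (s : String) : Int :=
  match s.toList with
  | [] => 0
  | c :: cs =>
      let runs := pvRuns (c :: cs)
      ((c :: cs).length : Int) + runs.length - 1 + (if runs.headD false then 1 else 0)

-- ===== PRECONDITION & SPEC =====
def Spec_min_key_presses (s : String) (out : Int) : Prop := out = min_key_presses_alt s
instance (s : String) (out : Int) : Decidable (Spec_min_key_presses s out) := by unfold Spec_min_key_presses; infer_instance

-- ===== CLAIM (what is proved, stated in full; the proofs are below) =====
def Claim_equal_min_key_presses : Prop := ∀ (s : String), Dom_min_key_presses s → Spec_min_key_presses s (min_key_presses s)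

-- ===== LEMMAS AND PROOFS =====

-- toggle count of A's loop, abstracted from the fold
def pvTog (m : Bool) : List Char → Int
  | [] => 0
  | c :: cs => (if PySem.Chars.isupper c != m then 1 else 0) + pvTog (PySem.Chars.isupper c) cs

theorem pv_fold_tog (l : List Char) (m : Bool) (k : Int) :
    (l.foldl
      (fun (st : Bool × Int) (c : Char) =>
        let st := if PySem.Chars.isupper c != st.1 then (!st.1, st.2 + 1) else st
        (st.1, st.2 + 1))
      (m, k)).2 = k + l.length + pvTog m l := by
  induction l generalizing m k with
  | nil => simp [pvTog]
  | cons c cs ih =>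
      simp only [List.foldl_cons, pvTog]
      by_cases h : PySem.Chars.isupper c = m
      · have hb : (PySem.Chars.isupper c != m) = false := by simp [h]
        simp only [hb, Bool.false_eq_true, if_false]
        rw [h, ih]
        push_cast [List.length_cons]; ring
      · have hb : (PySem.Chars.isupper c != m) = true := by simp [h]
        have hnot : (!m) = PySem.Chars.isupper c := by
          cases m <;> cases hc : PySem.Chars.isupper c <;> simp_all
        simp only [hb, if_true, hnot]
        rw [ih]
        push_cast [List.length_cons]; ring

-- toggles are unchanged across a prefix of characters all in the current mode
theorem pv_tog_same (t r : List Char) (u : Bool)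
    (h : ∀ d ∈ t, PySem.Chars.isupper d = u) :
    pvTog u (t ++ r) = pvTog u r := by
  induction t with
  | nil => rfl
  | cons d ds ih =>
      have hd : PySem.Chars.isupper d = u := h d (by simp)
      simp only [List.cons_append, pvTog, hd, bne_self_eq_false, Bool.false_eq_true, if_false]
      rw [ih (fun x hx => h x (by simp [hx]))]
      ring

-- toggle count equals (#runs - 1) plus the initial toggle into the first run
theorem pv_tog_runs (n : Nat) (c : Char) (cs : List Char) (hn : (c :: cs).length ≤ n)
    (m : Bool) :
    pvTog m (c :: cs)
      = (if PySem.Chars.isupper c != m then 1 else 0) + ((pvRuns (c :: cs)).length : Int) - 1 := by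
  induction n generalizing c cs m with
  | zero => simp at hn
  | succ n ih =>
        set u := PySem.Chars.isupper c with hu
        have hsplit : cs = cs.takeWhile (fun d => PySem.Chars.isupper d == u)
            ++ cs.dropWhile (fun d => PySem.Chars.isupper d == u) :=
          (List.takeWhile_append_dropWhile).symm
        have htake : ∀ d ∈ cs.takeWhile (fun d => PySem.Chars.isupper d == u),
            PySem.Chars.isupper d = u := by
          intro d hd
          have := List.mem_takeWhile_imp hd
          simpa using this
        have hlen : (cs.dropWhile (fun d => PySem.Chars.isupper d == u)).length ≤ n := by
          have h1 := List.length_dropWhile_le (fun d => PySem.Chars.isupper d == u) cs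
          simp only [List.length_cons] at hn
          omega
        have hruns : pvRuns (c :: cs)
            = u :: pvRuns (cs.dropWhile (fun d => PySem.Chars.isupper d == u)) := by
          simp only [pvRuns, hu]
        have hstep : pvTog m (c :: cs)
            = (if u != m then 1 else 0)
              + pvTog u (cs.dropWhile (fun d => PySem.Chars.isupper d == u)) := by
          conv_lhs => rw [show (c :: cs) = c ::
            (cs.takeWhile (fun d => PySem.Chars.isupper d == u)
              ++ cs.dropWhile (fun d => PySem.Chars.isupper d == u)) from by rw [← hsplit]]
          simp only [pvTog, ← hu]
          rw [pv_tog_same _ _ _ htake]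
        rw [hstep]
        cases hdrop : cs.dropWhile (fun d => PySem.Chars.isupper d == u) with
        | nil =>
            simp only [hdrop, hruns, pvTog, List.length_cons, List.length_nil, pvRuns]
            push_cast; ring
        | cons d ds =>
            have hd : PySem.Chars.isupper d ≠ u := by
              have := List.head?_dropWhile_not (fun d => PySem.Chars.isupper d == u) cs
              rw [hdrop] at this
              simpa using this
            have hbd : (PySem.Chars.isupper d != u) = true := by simp [hd]
            rw [hdrop] at hruns
            rw [ih d ds (by rw [← hdrop]; exact hlen) u]
            simp only [hruns, hbd, if_true, List.length_cons]
            push_cast; ring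

-- ===== VERDICT (by name: the statement is the Claim_ definition above) =====
theorem min_key_presses_spec : Claim_equal_min_key_presses := by
  intro s _
  unfold Spec_min_key_presses min_key_presses min_key_presses_alt
  rw [pv_fold_tog]
  cases h : s.toList with
  | nil => simp [pvTog]
  | cons c cs =>
      rw [pv_tog_runs ((c :: cs).length) c cs le_rfl]
      have hruns : pvRuns (c :: cs) = PySem.Chars.isupper c ::
          pvRuns (cs.dropWhile (fun d => PySem.Chars.isupper d == PySem.Chars.isupper c)) := by
        simp only [pvRuns]
      simp only [hruns, List.headD_cons, List.length_cons]
      cases hc : PySem.Chars.isupper c <;> simp <;> push_cast <;> ring
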